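-- pv_equiv track=rewrite | github.com/nazimurahman/CyberGuard | src/web_security/form_validator.py | _is_security_header_secure
-- ===== SOURCE A (Python) =====
-- def _is_security_header_secure(header: str, value: str) -> bool:
--     """
--     Check if security header is properly configured
--
--     Args:
--         header: Security header name
--         value: Header value
--
--     Returns:
--         True if header is securely configured, False otherwise
--     """
--     if not value:
--         return False
--
--     if header == 'Content-Security-Policy':
--         # Check for unsafe directives in CSP
--         unsafe_directives = ["'unsafe-inline'", "'unsafe-eval'", "*"]
--         return not any(directive in value for directive in unsafe_directives)
--
--     elif header == 'X-Frame-Options':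
--         # Check for proper X-Frame-Options values
--         return value.upper() in ['DENY', 'SAMEORIGIN']
--
--     elif header == 'X-Content-Type-Options':
--         # Check for nosniff directive
--         return value.lower() == 'nosniff'
--
--     elif header == 'X-XSS-Protection':
--         # Check for XSS protection with blocking mode
--         return '1; mode=block' in value
--
--     elif header == 'Referrer-Policy':
--         # Check for secure referrer policy values
--         secure_values = ['no-referrer', 'same-origin', 'strict-origin']
--         return any(secure_value in value for secure_value in secure_values)
--
--     return True  # Default to True for other headers
-- ===== SOURCE B (Python) =====
-- # Each header's check is a declarative rule record interpreted by one generic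
-- # evaluator: (transform, op, patterns, negate).
-- _RULES = {
--     'Content-Security-Policy': ('id', 'substr', ["'unsafe-inline'", "'unsafe-eval'", "*"], True),
--     'X-Frame-Options': ('upper', 'member', ['DENY', 'SAMEORIGIN'], False),
--     'X-Content-Type-Options': ('lower', 'member', ['nosniff'], False),
--     'X-XSS-Protection': ('id', 'substr', ['1; mode=block'], False),
--     'Referrer-Policy': ('id', 'substr', ['no-referrer', 'same-origin', 'strict-origin'], False),
-- }
--
--
-- def _is_security_header_secure(header: str, value: str) -> bool:
--     if not value:
--         return False
--     rule = _RULES.get(header)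
--     if rule is None:
--         return True
--     transform, op, patterns, negate = rule
--     if transform == 'upper':
--         v = value.upper()
--     elif transform == 'lower':
--         v = value.lower()
--     else:
--         v = value
--     if op == 'substr':
--         hit = any(p in v for p in patterns)
--     else:
--         hit = v in patterns
--     return hit != negate
-- ===== Notes on version B (the rewrite author's own statement) =====
-- stated objective: alternative
-- what changed: Replaces the if-elif chain of five bespoke boolean expressions with a declarative rule table (transform, match-kind, patterns, negate) evaluated by a single generic interpreter, so the per-header logic becomes data instead of code.
import Mathlib
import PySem

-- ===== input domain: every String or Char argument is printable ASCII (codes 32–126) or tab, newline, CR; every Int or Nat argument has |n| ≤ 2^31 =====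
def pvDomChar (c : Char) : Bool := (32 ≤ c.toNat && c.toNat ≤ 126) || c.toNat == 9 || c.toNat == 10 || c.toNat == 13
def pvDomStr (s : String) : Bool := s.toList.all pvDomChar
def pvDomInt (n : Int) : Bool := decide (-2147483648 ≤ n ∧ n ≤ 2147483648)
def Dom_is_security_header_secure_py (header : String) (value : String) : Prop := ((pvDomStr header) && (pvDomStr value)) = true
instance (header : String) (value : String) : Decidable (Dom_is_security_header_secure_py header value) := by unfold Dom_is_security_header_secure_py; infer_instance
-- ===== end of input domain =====

-- B replaces A's if-elif chain of bespoke expressions with a declarative rule table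
-- interpreted by a single generic evaluator (alternative decomposition); return values are identical.

set_option maxRecDepth 4000

-- ===== PORT A =====
def is_security_header_secure_py (header : String) (value : String) : Bool :=
  if value = "" then false
  else if header = "Content-Security-Policy" then
    !(["'unsafe-inline'", "'unsafe-eval'", "*"].any (fun d => PySem.Str.isIn d value))
  else if header = "X-Frame-Options" then
    ["DENY", "SAMEORIGIN"].contains (PySem.Str.upper value)
  else if header = "X-Content-Type-Options" then
    PySem.Str.lower value == "nosniff"
  else if header = "X-XSS-Protection" then
    PySem.Str.isIn "1; mode=block" value
  else if header = "Referrer-Policy" then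
    ["no-referrer", "same-origin", "strict-origin"].any (fun s => PySem.Str.isIn s value)
  else true

-- ===== PORT B =====
-- a rule record: (transform, op, patterns, negate), as in Source B's _RULES tuples
def pvRules : PySem.Dict String (String × String × List String × Bool) :=
  PySem.Dict.ofList
    [ ("Content-Security-Policy", ("id", "substr", ["'unsafe-inline'", "'unsafe-eval'", "*"], true)),
      ("X-Frame-Options", ("upper", "member", ["DENY", "SAMEORIGIN"], false)),
      ("X-Content-Type-Options", ("lower", "member", ["nosniff"], false)),
      ("X-XSS-Protection", ("id", "substr", ["1; mode=block"], false)),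
      ("Referrer-Policy", ("id", "substr", ["no-referrer", "same-origin", "strict-origin"], false)) ]

def is_security_header_secure_py_alt (header : String) (value : String) : Bool :=
  if value = "" then false
  else
    match PySem.Dict.get? pvRules header with
    | none => true
    | some (transform, op, patterns, negate) =>
      let v := if transform = "upper" then PySem.Str.upper value
               else if transform = "lower" then PySem.Str.lower value
               else value
      let hit := if op = "substr" then patterns.any (fun p => PySem.Str.isIn p v)
                 else patterns.contains v
      hit != negate

-- ===== PRECONDITION & SPEC =====
def Spec_is_security_header_secure_py (header : String) (value : String) (out : Bool) : Prop := out = is_security_header_secure_py_alt header value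
instance (header : String) (value : String) (out : Bool) : Decidable (Spec_is_security_header_secure_py header value out) := by unfold Spec_is_security_header_secure_py; infer_instance

-- ===== CLAIM (what is proved, stated in full; the proofs are below) =====
def Claim_equal_is_security_header_secure_py : Prop := ∀ (header : String) (value : String), Dom_is_security_header_secure_py header value → Spec_is_security_header_secure_py header value (is_security_header_secure_py header value)

-- ===== LEMMAS AND PROOFS =====

-- lookup facts about the rule table, each by computation
theorem pvGetCSP : PySem.Dict.get? pvRules "Content-Security-Policy" = some ("id", "substr", ["'unsafe-inline'", "'unsafe-eval'", "*"], true) := rfl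
theorem pvGetXFO : PySem.Dict.get? pvRules "X-Frame-Options" = some ("upper", "member", ["DENY", "SAMEORIGIN"], false) := rfl
theorem pvGetXCTO : PySem.Dict.get? pvRules "X-Content-Type-Options" = some ("lower", "member", ["nosniff"], false) := rfl
theorem pvGetXXP : PySem.Dict.get? pvRules "X-XSS-Protection" = some ("id", "substr", ["1; mode=block"], false) := rfl
theorem pvGetRP : PySem.Dict.get? pvRules "Referrer-Policy" = some ("id", "substr", ["no-referrer", "same-origin", "strict-origin"], false) := rfl

-- ===== VERDICT (by name: the statement is the Claim_ definition above) =====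
theorem is_security_header_secure_py_spec : Claim_equal_is_security_header_secure_py := by
  intro header value _
  unfold Spec_is_security_header_secure_py is_security_header_secure_py is_security_header_secure_py_alt
  by_cases hv : value = ""
  · simp [hv]
  · simp only [hv, if_false]
    rcases eq_or_ne header "Content-Security-Policy" with h | h1
    · rw [h, pvGetCSP]; simp [List.any]
    · rcases eq_or_ne header "X-Frame-Options" with h | h2
      · rw [h, pvGetXFO]; simp
      · rcases eq_or_ne header "X-Content-Type-Options" with h | h3
        · rw [h, pvGetXCTO]; simp; exact beq_eq_decide _ _
        · rcases eq_or_ne header "X-XSS-Protection" with h | h4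
          · rw [h, pvGetXXP]; simp [List.any]
          · rcases eq_or_ne header "Referrer-Policy" with h | h5
            · rw [h, pvGetRP]; simp [List.any]
            · have g1 : ("Content-Security-Policy" == header) = false :=
                beq_eq_false_iff_ne.mpr (Ne.symm h1)
              have g2 : ("X-Frame-Options" == header) = false :=
                beq_eq_false_iff_ne.mpr (Ne.symm h2)
              have g3 : ("X-Content-Type-Options" == header) = false :=
                beq_eq_false_iff_ne.mpr (Ne.symm h3)
              have g4 : ("X-XSS-Protection" == header) = false :=
                beq_eq_false_iff_ne.mpr (Ne.symm h4)
              have g5 : ("Referrer-Policy" == header) = false :=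
                beq_eq_false_iff_ne.mpr (Ne.symm h5)
              simp [h1, h2, h3, h4, h5, g1, g2, g3, g4, g5, pvRules, PySem.Dict.ofList,
                PySem.Dict.insert, PySem.Dict.get?, PySem.Dict.empty, PySem.Dict.update,
                List.find?]
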